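-- pv_equiv track=rewrite | github.com/le7042489-coder/gem | app.py | extract_diagnosis_summary
-- ===== SOURCE A (Python) =====
-- def extract_diagnosis_summary(text):
--     lines = [line.strip() for line in text.splitlines() if line.strip()]
--     for line in lines:
--         if line.lower().startswith("diagnosis"):
--             parts = line.split(":", 1)
--             return parts[1].strip() if len(parts) > 1 else None
--         if line.lower().startswith("impression"):
--             parts = line.split(":", 1)
--             return parts[1].strip() if len(parts) > 1 else None
--     for line in lines:
--         if not line.startswith("FINDING|") and not line.lower().startswith("findings"):
--             return line
--     return None
-- ===== SOURCE B (Python) =====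
-- def extract_diagnosis_summary(text):
--     fallback = None
--     for raw in text.splitlines():
--         line = raw.strip()
--         if not line:
--             continue
--         low = line.lower()
--         if low.startswith("diagnosis") or low.startswith("impression"):
--             parts = line.split(":", 1)
--             return parts[1].strip() if len(parts) > 1 else None
--         if fallback is None and not line.startswith("FINDING|") and not low.startswith("findings"):
--             fallback = line
--     return fallback
-- ===== Notes on version B (the rewrite author's own statement) =====
-- stated objective: alternative
-- what changed: Replaced A's build-a-cleaned-list plus two sequential scans (one for diagnosis/impression, one for the default line) by a single stateful pass over the raw lines that strips/filters inline and carries an accumulator for the first acceptable default line.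
import Mathlib
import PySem

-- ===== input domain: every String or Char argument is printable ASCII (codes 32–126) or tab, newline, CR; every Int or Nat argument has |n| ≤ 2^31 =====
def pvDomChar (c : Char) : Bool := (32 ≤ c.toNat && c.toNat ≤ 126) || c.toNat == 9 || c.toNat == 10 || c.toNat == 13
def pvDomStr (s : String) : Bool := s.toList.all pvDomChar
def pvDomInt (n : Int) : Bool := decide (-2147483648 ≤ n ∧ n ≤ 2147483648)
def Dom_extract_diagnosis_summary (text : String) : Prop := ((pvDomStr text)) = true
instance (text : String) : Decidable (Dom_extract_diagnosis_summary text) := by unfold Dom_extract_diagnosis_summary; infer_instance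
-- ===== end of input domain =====

-- B merges A's cleaned-list construction and its two sequential scans into one stateful
-- pass over the raw lines carrying a fallback accumulator; return value equivalence is proved.

-- ===== PORT A =====
-- A: build the list of stripped non-empty lines, then scan it twice.
def aDiagLoop : List String → Option (Option String)
  | [] => none
  | line :: rest =>
    if PySem.Str.startswith (PySem.Str.lower line) "diagnosis" then
      some (match PySem.Str.splitMax? line ":" 1 with
            | some parts =>
                if parts.length > 1 then (PySem.List.pyGet? parts 1).map PySem.Str.strip else none
            | none => none)
    else if PySem.Str.startswith (PySem.Str.lower line) "impression" then
      some (match PySem.Str.splitMax? line ":" 1 with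
            | some parts =>
                if parts.length > 1 then (PySem.List.pyGet? parts 1).map PySem.Str.strip else none
            | none => none)
    else aDiagLoop rest

def aFallbackLoop : List String → Option String
  | [] => none
  | line :: rest =>
    if !PySem.Str.startswith line "FINDING|" && !PySem.Str.startswith (PySem.Str.lower line) "findings" then
      some line
    else aFallbackLoop rest

def extract_diagnosis_summary (text : String) : Option String :=
  let lines := (PySem.Str.splitlines text).filterMap
    (fun l => if PySem.Str.strip l ≠ "" then some (PySem.Str.strip l) else none)
  match aDiagLoop lines with
  | some r => r
  | none => aFallbackLoop lines

-- ===== PORT B =====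
-- B: one pass over the raw lines with a fallback accumulator.
def bLoop : List String → Option String → Option String
  | [], fallback => fallback
  | raw :: rest, fallback =>
    let line := PySem.Str.strip raw
    if line = "" then bLoop rest fallback
    else
      let low := PySem.Str.lower line
      if PySem.Str.startswith low "diagnosis" || PySem.Str.startswith low "impression" then
        match PySem.Str.splitMax? line ":" 1 with
        | some parts =>
            if parts.length > 1 then (PySem.List.pyGet? parts 1).map PySem.Str.strip else none
        | none => none
      else
        bLoop rest
          (if fallback.isNone && !PySem.Str.startswith line "FINDING|" && !PySem.Str.startswith low "findings" then
            some line
          else fallback)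

def extract_diagnosis_summary_alt (text : String) : Option String :=
  bLoop (PySem.Str.splitlines text) none

-- ===== PRECONDITION & SPEC =====
def Spec_extract_diagnosis_summary (text : String) (out : Option String) : Prop := out = extract_diagnosis_summary_alt text
instance (text : String) (out : Option String) : Decidable (Spec_extract_diagnosis_summary text out) := by unfold Spec_extract_diagnosis_summary; infer_instance

-- ===== CLAIM (what is proved, stated in full; the proofs are below) =====
def Claim_equal_extract_diagnosis_summary : Prop := ∀ (text : String), Dom_extract_diagnosis_summary text → Spec_extract_diagnosis_summary text (extract_diagnosis_summary text)

-- ===== LEMMAS AND PROOFS =====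

theorem bLoop_eq (L : List String) (fb : Option String) :
    bLoop L fb =
      (match aDiagLoop (L.filterMap
          (fun l => if PySem.Str.strip l ≠ "" then some (PySem.Str.strip l) else none)) with
       | some r => r
       | none =>
          match fb with
          | some x => some x
          | none => aFallbackLoop (L.filterMap
              (fun l => if PySem.Str.strip l ≠ "" then some (PySem.Str.strip l) else none))) := by
  induction L generalizing fb with
  | nil => cases fb <;> simp [bLoop, aDiagLoop, aFallbackLoop]
  | cons raw rest ih =>
    by_cases hs : PySem.Str.strip raw = ""
    · simp [bLoop, hs, ih]
    · by_cases h1 : PySem.Str.startswith (PySem.Str.lower (PySem.Str.strip raw)) "diagnosis" = true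
      · simp at h1
        simp [bLoop, aDiagLoop, hs, h1]
      · by_cases h2 : PySem.Str.startswith (PySem.Str.lower (PySem.Str.strip raw)) "impression" = true
        · simp at h1 h2
          simp [bLoop, aDiagLoop, hs, h1, h2]
        · cases fb with
          | some x =>
            simp at h1 h2
            simp [bLoop, aDiagLoop, hs, h1, h2, ih]
          | none =>
            by_cases hfa : PySem.Str.startswith (PySem.Str.strip raw) "FINDING|" = true <;>
              by_cases hfb : PySem.Str.startswith (PySem.Str.lower (PySem.Str.strip raw)) "findings" = true <;>
              simp at h1 h2 hfa hfb <;>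
              simp [bLoop, aDiagLoop, aFallbackLoop, hs, h1, h2, hfa, hfb, ih]

-- ===== VERDICT (by name: the statement is the Claim_ definition above) =====
theorem extract_diagnosis_summary_spec : Claim_equal_extract_diagnosis_summary := by
  intro text _
  unfold Spec_extract_diagnosis_summary extract_diagnosis_summary extract_diagnosis_summary_alt
  rw [bLoop_eq]
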